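-- pv_equiv track=rewrite | github.com/martonbognar/openipe | core/sim/rtl_sim/src-c/framework/translator.py | nb_reg_used
-- ===== SOURCE A (Python) =====
-- def nb_reg_used(argTypes):
--     nb_reg = 0
--     # data sizes in MSPCompilerGuide p82 (for restricted data model) (enums not supported)
--     for argType in argTypes:
--         if argType in ["long long", "signed long long", "unsigned long long", "double", "long double"]:  # 64 bit == 4 reg
--             nb_reg += 4
--         elif argType in ["long", "signed long", "unsigned long", "float"]:  # 32 bit == 2 reg
--             nb_reg += 2
--         elif argType in ["void"]:
--             nb_reg += 0
--         else:
--             nb_reg += 1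
--     return nb_reg
-- ===== SOURCE B (Python) =====
-- TYPES_64 = ("long long", "signed long long", "unsigned long long", "double", "long double")
-- TYPES_32 = ("long", "signed long", "unsigned long", "float")
--
-- def nb_reg_used(argTypes):
--     # staged aggregate counting: count occurrences of each class, then one formula
--     n64 = sum(argTypes.count(t) for t in TYPES_64)
--     n32 = sum(argTypes.count(t) for t in TYPES_32)
--     nvoid = argTypes.count("void")
--     return 4 * n64 + 2 * n32 + (len(argTypes) - n64 - n32 - nvoid)
-- ===== Notes on version B (the rewrite author's own statement) =====
-- stated objective: alternative
-- what changed: Instead of A's single pass accumulating a per-element branch-chain weight, B makes staged aggregate passes: it counts the occurrences of each 64-bit, 32-bit and void type with list.count and computes the result by one arithmetic formula 4*n64 + 2*n32 + (len - n64 - n32 - nvoid), the default-1 class obtained by subtraction from the length rather than ever being classified per element.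
import Mathlib
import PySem

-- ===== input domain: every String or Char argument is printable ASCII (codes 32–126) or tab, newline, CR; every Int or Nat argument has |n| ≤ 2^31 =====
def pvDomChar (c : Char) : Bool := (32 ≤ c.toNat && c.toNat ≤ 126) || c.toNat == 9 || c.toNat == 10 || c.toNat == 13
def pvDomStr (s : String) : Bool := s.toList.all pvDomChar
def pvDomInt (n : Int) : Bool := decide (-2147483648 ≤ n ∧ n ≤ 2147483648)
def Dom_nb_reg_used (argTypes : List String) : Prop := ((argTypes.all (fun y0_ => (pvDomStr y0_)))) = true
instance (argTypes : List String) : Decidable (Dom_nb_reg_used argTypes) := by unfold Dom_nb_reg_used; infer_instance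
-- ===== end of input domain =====

-- B replaces A's single per-element branch-chain pass by staged aggregate counting passes
-- (list.count per recognized type) combined in one arithmetic formula (objective: alternative).

-- ===== PORT A =====
def nb_reg_used (argTypes : List String) : Int :=
  argTypes.foldl (fun nb_reg argType =>
    if argType ∈ ["long long", "signed long long", "unsigned long long", "double", "long double"] then
      nb_reg + 4
    else if argType ∈ ["long", "signed long", "unsigned long", "float"] then
      nb_reg + 2
    else if argType ∈ ["void"] then
      nb_reg + 0
    else
      nb_reg + 1) 0

-- ===== PORT B =====
def types64 : List String := ["long long", "signed long long", "unsigned long long", "double", "long double"]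
def types32 : List String := ["long", "signed long", "unsigned long", "float"]

def nb_reg_used_alt (argTypes : List String) : Int :=
  let n64 : Int := (types64.map (fun t => (PySem.List.count argTypes t : Int))).sum
  let n32 : Int := (types32.map (fun t => (PySem.List.count argTypes t : Int))).sum
  let nvoid : Int := (PySem.List.count argTypes "void" : Int)
  4 * n64 + 2 * n32 + (PySem.List.len argTypes - n64 - n32 - nvoid)

-- ===== PRECONDITION & SPEC =====
def Spec_nb_reg_used (argTypes : List String) (out : Int) : Prop := out = nb_reg_used_alt argTypes
instance (argTypes : List String) (out : Int) : Decidable (Spec_nb_reg_used argTypes out) := by unfold Spec_nb_reg_used; infer_instance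

-- ===== CLAIM (what is proved, stated in full; the proofs are below) =====
def Claim_equal_nb_reg_used : Prop := ∀ (argTypes : List String), Dom_nb_reg_used argTypes → Spec_nb_reg_used argTypes (nb_reg_used argTypes)

-- ===== LEMMAS AND PROOFS =====

-- B's formula satisfies the same head-step recurrence as A's branch chain
theorem alt_cons (hd : String) (tl : List String) :
    nb_reg_used_alt (hd :: tl) =
      (if hd ∈ ["long long", "signed long long", "unsigned long long", "double", "long double"] then (4 : Int)
       else if hd ∈ ["long", "signed long", "unsigned long", "float"] then 2
       else if hd ∈ ["void"] then 0
       else 1) + nb_reg_used_alt tl := by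
  simp only [nb_reg_used_alt, types64, types32, PySem.List.count_eq, PySem.List.len,
    List.map_cons, List.map_nil, List.sum_cons, List.sum_nil, List.count_cons,
    List.length_cons]
  by_cases h1 : hd = "long long" <;> by_cases h2 : hd = "signed long long" <;>
  by_cases h3 : hd = "unsigned long long" <;> by_cases h4 : hd = "double" <;>
  by_cases h5 : hd = "long double" <;> by_cases h6 : hd = "long" <;>
  by_cases h7 : hd = "signed long" <;> by_cases h8 : hd = "unsigned long" <;>
  by_cases h9 : hd = "float" <;> by_cases h10 : hd = "void" <;>
    simp_all [beq_iff_eq] <;> ring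

theorem fold_eq (argTypes : List String) (acc : Int) :
    argTypes.foldl (fun nb_reg argType =>
      if argType ∈ ["long long", "signed long long", "unsigned long long", "double", "long double"] then
        nb_reg + 4
      else if argType ∈ ["long", "signed long", "unsigned long", "float"] then
        nb_reg + 2
      else if argType ∈ ["void"] then
        nb_reg + 0
      else
        nb_reg + 1) acc
    = acc + nb_reg_used_alt argTypes := by
  induction argTypes generalizing acc with
  | nil => simp [nb_reg_used_alt, types64, types32, PySem.List.count_eq, PySem.List.len]
  | cons hd tl ih =>
    simp only [List.foldl_cons, ih, alt_cons]
    split_ifs <;> ring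

-- ===== VERDICT (by name: the statement is the Claim_ definition above) =====
theorem nb_reg_used_spec : Claim_equal_nb_reg_used := by
  intro argTypes _
  unfold Spec_nb_reg_used nb_reg_used
  rw [fold_eq]; ring
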